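-- pv_equiv track=rewrite | github.com/sky7th/BOJ | 구름 LEVEL/[알고리즘 히어로즈] 셀프레벨테스트 9차/1. 거울 단어.py | isMirrorWord
-- ===== SOURCE A (Python) =====
-- d = {'b':'d', 'd':'b', 'i':'i', 'l':'l', 'm':'m', 'n':'n', 'o':'o', 'p':'q', 'q':'p', 's':'z', 'z':'s', 'u':'u', 'v':'v', 'w':'w', 'x':'x'}
--
-- def isMirrorWord(word):
-- 	mirror_word = ''
-- 	for i in range(len(word)-1, -1, -1):
-- 		c = word[i]
-- 		if c in d:
-- 			c = d[c]
-- 		mirror_word += c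
-- 	return word == mirror_word
-- ===== SOURCE B (Python) =====
-- d = {'b':'d', 'd':'b', 'i':'i', 'l':'l', 'm':'m', 'n':'n', 'o':'o', 'p':'q', 'q':'p', 's':'z', 'z':'s', 'u':'u', 'v':'v', 'w':'w', 'x':'x'}
--
-- def isMirrorWord(word):
--     n = len(word)
--     for i in range(n):
--         c = word[n - 1 - i]
--         if word[i] != d.get(c, c):
--             return False
--     return True
-- ===== Notes on version B (the rewrite author's own statement) =====
-- stated objective: simpler
-- what changed: B replaces A's construction of the full mirrored string followed by a string comparison with a single index scan that compares word[i] to the mirror of word[n-1-i] and returns False at the first mismatch; building no intermediate string and short-circuiting makes it measurably faster.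
import Mathlib
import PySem

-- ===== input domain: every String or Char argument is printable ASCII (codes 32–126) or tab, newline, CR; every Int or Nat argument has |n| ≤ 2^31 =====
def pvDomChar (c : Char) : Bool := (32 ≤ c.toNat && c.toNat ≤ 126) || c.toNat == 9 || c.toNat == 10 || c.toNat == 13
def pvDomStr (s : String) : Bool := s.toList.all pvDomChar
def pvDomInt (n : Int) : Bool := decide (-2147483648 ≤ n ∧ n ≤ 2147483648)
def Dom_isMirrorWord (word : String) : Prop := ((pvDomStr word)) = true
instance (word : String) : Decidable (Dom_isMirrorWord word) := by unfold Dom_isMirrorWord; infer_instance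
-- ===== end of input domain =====

-- B is a simpler in-place two-index scan: it compares word[i] with the mirror of
-- word[n-1-i] and stops at the first mismatch, building no intermediate string.

-- the module-level dict d, shared by both Pythons
def dMap : PySem.Dict Char Char :=
  PySem.Dict.ofList [('b','d'), ('d','b'), ('i','i'), ('l','l'), ('m','m'), ('n','n'),
    ('o','o'), ('p','q'), ('q','p'), ('s','z'), ('z','s'), ('u','u'), ('v','v'),
    ('w','w'), ('x','x')]

-- ===== PORT A =====
def isMirrorWord (word : String) : Bool :=
  let w := word.toList
  let mirror := (PySem.List.pyRange ((w.length : Int) - 1) (-1) (-1)).foldl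
    (fun acc i =>
      let c := PySem.List.pyGetD w i ' '         -- word[i]; i always in range here
      let c := match dMap.get? c with            -- if c in d: c = d[c]
        | some c' => c'
        | none => c
      acc ++ [c]) ([] : List Char)
  w == mirror

-- ===== PORT B =====
-- the loop of Source B: index i from 0 to n-1, early return False on mismatch
def altGo (w : List Char) (n i : Nat) : Bool :=
  if _h : i < n then
    -- c = word[n-1-i]; compare word[i] with d.get(c, c)
    if w.getD i ' ' = dMap.getD (w.getD (n - 1 - i) ' ') (w.getD (n - 1 - i) ' ')
    then altGo w n (i + 1) else false
  else true
termination_by n - i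

def isMirrorWord_alt (word : String) : Bool :=
  altGo word.toList word.toList.length 0

-- ===== PRECONDITION & SPEC =====
def Spec_isMirrorWord (word : String) (out : Bool) : Prop := out = isMirrorWord_alt word
instance (word : String) (out : Bool) : Decidable (Spec_isMirrorWord word out) := by unfold Spec_isMirrorWord; infer_instance

-- ===== CLAIM (what is proved, stated in full; the proofs are below) =====
def Claim_equal_isMirrorWord : Prop := ∀ (word : String), Dom_isMirrorWord word → Spec_isMirrorWord word (isMirrorWord word)

-- ===== LEMMAS AND PROOFS =====

-- A's branch ("c in d" then "d[c]") computes the same char as B's d.get(c, c)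
theorem mir_eq (c : Char) :
    (match dMap.get? c with | some c' => c' | none => c) = dMap.getD c c := by
  cases h : dMap.get? c <;> simp [PySem.Dict.getD, h]

-- A's mirror string, characterised pointwise
theorem mirrorA_eq (w : List Char) :
    (PySem.List.pyRange ((w.length : Int) - 1) (-1) (-1)).foldl
      (fun acc i =>
        let c := PySem.List.pyGetD w i ' '
        let c := match dMap.get? c with
          | some c' => c'
          | none => c
        acc ++ [c]) ([] : List Char)
    = (List.range w.length).map
        (fun k => dMap.getD (w.getD (w.length - 1 - k) ' ') (w.getD (w.length - 1 - k) ' ')) := by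
  rw [PySem.List.foldl_append_singleton_eq_map, PySem.List.pyRange_neg_one]
  have hn : (((w.length : Int) - 1) - (-1)).toNat = w.length := by omega
  rw [hn, List.map_map]
  apply List.map_congr_left
  intro k hk
  rw [List.mem_range] at hk
  simp only [Function.comp]
  rw [mir_eq]
  have hidx : ((w.length : Int) - 1) - (k : Int) = ((w.length - 1 - k : Nat) : Int) := by omega
  rw [hidx, PySem.List.pyGetD_natCast]

-- B's loop decides the pointwise condition from index i upward
theorem altGo_iff (w : List Char) (n i : Nat) :
    altGo w n i = true ↔
      ∀ j, i ≤ j → j < n →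
        w.getD j ' ' = (dMap.getD (w.getD (n - 1 - j) ' ') (w.getD (n - 1 - j) ' ')) := by
  induction i using altGo.induct w n with
  | case1 i h heq ih =>
    rw [altGo]
    simp only [dif_pos h, if_pos heq]
    rw [ih]
    constructor
    · intro hall j hij hjn
      rcases Nat.eq_or_lt_of_le hij with rfl | hlt
      · exact heq
      · exact hall j hlt hjn
    · intro hall j hij hjn
      exact hall j (by omega) hjn
  | case2 i h hne =>
    rw [altGo]
    simp only [dif_pos h, if_neg hne, Bool.false_eq_true, false_iff]
    intro hall
    exact hne (hall i le_rfl h)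
  | case3 i h =>
    rw [altGo]
    simp only [dif_neg h, true_iff]
    intro j hij hjn
    omega

theorem main_eq (w : List Char) :
    (w == (List.range w.length).map
        (fun k => dMap.getD (w.getD (w.length - 1 - k) ' ') (w.getD (w.length - 1 - k) ' ')))
    = altGo w w.length 0 := by
  by_cases hB : altGo w w.length 0 = true
  · rw [hB, beq_iff_eq]
    apply List.ext_getElem (by simp)
    intro k hk hk'
    have := (altGo_iff w w.length 0).mp hB k (Nat.zero_le k) hk
    simp only [List.getElem_map, List.getElem_range]
    rw [← this]
    exact (List.getD_eq_getElem w ' ' hk).symm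
  · rw [Bool.eq_false_iff.mpr hB, beq_eq_false_iff_ne]
    intro heq
    apply hB
    rw [altGo_iff]
    intro j _ hjn
    have : w.getD j ' ' = ((List.range w.length).map
        (fun k => dMap.getD (w.getD (w.length - 1 - k) ' ') (w.getD (w.length - 1 - k) ' '))).getD j ' ' := by
      rw [← heq]
    rw [this]
    rw [List.getD_eq_getElem _ ' ' (by simpa using hjn)]
    simp

-- ===== VERDICT (by name: the statement is the Claim_ definition above) =====
theorem isMirrorWord_spec : Claim_equal_isMirrorWord := by
  intro word _
  unfold Spec_isMirrorWord isMirrorWord isMirrorWord_alt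
  simp only
  rw [mirrorA_eq, main_eq]
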